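-- pv_equiv track=rewrite | github.com/nadiiagut/ai-requirement-readiness-analyzer | src/duplicate_detector.py | _get_synonyms
-- ===== SOURCE A (Python) =====
-- def _get_synonyms(word: str) -> set:
--     """Get common synonyms for requirement-related words."""
--     synonym_groups = [
--         {'login', 'signin', 'sign-in', 'authenticate', 'authentication', 'log-in'},
--         {'logout', 'signout', 'sign-out', 'log-out'},
--         {'create', 'add', 'make', 'build', 'implement', 'develop'},
--         {'update', 'edit', 'modify', 'change', 'revise'},
--         {'delete', 'remove', 'erase', 'drop'},
--         {'view', 'display', 'show', 'see', 'list'},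
--         {'user', 'users', 'customer', 'customers', 'member', 'members'},
--         {'password', 'passwords', 'credential', 'credentials', 'pass'},
--         {'email', 'emails', 'e-mail', 'mail'},
--         {'profile', 'profiles', 'account', 'accounts'},
--         {'reset', 'restore', 'recover', 'recovery'},
--         {'notification', 'notifications', 'notify', 'alert', 'alerts'},
--         {'automatic', 'auto', 'automatically'},
--         {'enable', 'enabled', 'activate', 'turn-on'},
--         {'disable', 'disabled', 'deactivate', 'turn-off'},
--         {'export', 'download', 'extract'},
--         {'import', 'upload', 'load'},
--         {'data', 'information', 'info'},
--         {'dashboard', 'panel', 'overview'},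
--     ]
--
--     result = {word}
--     for group in synonym_groups:
--         if word in group:
--             result.update(group)
--     return result
-- ===== SOURCE B (Python) =====
-- _SYNONYM_GROUPS = [
--     ('login', 'signin', 'sign-in', 'authenticate', 'authentication', 'log-in'),
--     ('logout', 'signout', 'sign-out', 'log-out'),
--     ('create', 'add', 'make', 'build', 'implement', 'develop'),
--     ('update', 'edit', 'modify', 'change', 'revise'),
--     ('delete', 'remove', 'erase', 'drop'),
--     ('view', 'display', 'show', 'see', 'list'),
--     ('user', 'users', 'customer', 'customers', 'member', 'members'),
--     ('password', 'passwords', 'credential', 'credentials', 'pass'),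
--     ('email', 'emails', 'e-mail', 'mail'),
--     ('profile', 'profiles', 'account', 'accounts'),
--     ('reset', 'restore', 'recover', 'recovery'),
--     ('notification', 'notifications', 'notify', 'alert', 'alerts'),
--     ('automatic', 'auto', 'automatically'),
--     ('enable', 'enabled', 'activate', 'turn-on'),
--     ('disable', 'disabled', 'deactivate', 'turn-off'),
--     ('export', 'download', 'extract'),
--     ('import', 'upload', 'load'),
--     ('data', 'information', 'info'),
--     ('dashboard', 'panel', 'overview'),
-- ]
--
-- # Prebuilt index: every word of any group -> that group's member set.
-- _SYNONYM_MAP = {w: set(g) for g in _SYNONYM_GROUPS for w in g}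
--
--
-- def _get_synonyms(word: str) -> set:
--     """Get common synonyms for requirement-related words."""
--     result = {word}
--     result |= _SYNONYM_MAP.get(word, set())
--     return result
-- ===== Notes on version B (the rewrite author's own statement) =====
-- stated objective: idiomatic
-- what changed: Replaces the per-call scan over all 19 synonym groups with a module-level dict built once that maps each word to its group's member set; the function becomes a single dict lookup unioned with {word}.
import Mathlib
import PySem

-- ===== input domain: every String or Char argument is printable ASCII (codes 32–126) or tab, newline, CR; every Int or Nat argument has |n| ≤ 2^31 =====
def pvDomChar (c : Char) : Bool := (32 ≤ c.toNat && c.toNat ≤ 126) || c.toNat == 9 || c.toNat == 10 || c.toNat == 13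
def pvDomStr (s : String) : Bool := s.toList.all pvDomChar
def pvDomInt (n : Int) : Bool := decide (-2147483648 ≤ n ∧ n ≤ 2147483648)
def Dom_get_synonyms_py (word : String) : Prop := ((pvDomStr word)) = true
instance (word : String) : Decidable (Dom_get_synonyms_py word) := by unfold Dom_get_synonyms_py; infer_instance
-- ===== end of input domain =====

-- B replaces A's per-call scan over all 19 synonym groups by a prebuilt word → group-set dict and a single lookup (idiomatic).

-- ===== PORT A =====
-- A's literal synonym_groups list
def pvSynGroups : List (PySem.Set String) :=
  [PySem.Set.ofList ["login", "signin", "sign-in", "authenticate", "authentication", "log-in"],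
   PySem.Set.ofList ["logout", "signout", "sign-out", "log-out"],
   PySem.Set.ofList ["create", "add", "make", "build", "implement", "develop"],
   PySem.Set.ofList ["update", "edit", "modify", "change", "revise"],
   PySem.Set.ofList ["delete", "remove", "erase", "drop"],
   PySem.Set.ofList ["view", "display", "show", "see", "list"],
   PySem.Set.ofList ["user", "users", "customer", "customers", "member", "members"],
   PySem.Set.ofList ["password", "passwords", "credential", "credentials", "pass"],
   PySem.Set.ofList ["email", "emails", "e-mail", "mail"],
   PySem.Set.ofList ["profile", "profiles", "account", "accounts"],
   PySem.Set.ofList ["reset", "restore", "recover", "recovery"],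
   PySem.Set.ofList ["notification", "notifications", "notify", "alert", "alerts"],
   PySem.Set.ofList ["automatic", "auto", "automatically"],
   PySem.Set.ofList ["enable", "enabled", "activate", "turn-on"],
   PySem.Set.ofList ["disable", "disabled", "deactivate", "turn-off"],
   PySem.Set.ofList ["export", "download", "extract"],
   PySem.Set.ofList ["import", "upload", "load"],
   PySem.Set.ofList ["data", "information", "info"],
   PySem.Set.ofList ["dashboard", "panel", "overview"]]

def get_synonyms_py (word : String) : List String :=
  pvSynGroups.foldl
    (fun result group =>
      if PySem.Set.contains group word then PySem.Set.update result group else result)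
    (PySem.Set.ofList [word])

-- ===== PORT B =====
-- B's module-level dict comprehension: every word of any group ↦ that group's member set
-- (all 81 keys are distinct, so the comprehension IS this literal dict)
def pvSynMap : PySem.Dict String (PySem.Set String) :=
  PySem.Dict.mk
  [("login", PySem.Set.ofList ["login", "signin", "sign-in", "authenticate", "authentication", "log-in"]),
   ("signin", PySem.Set.ofList ["login", "signin", "sign-in", "authenticate", "authentication", "log-in"]),
   ("sign-in", PySem.Set.ofList ["login", "signin", "sign-in", "authenticate", "authentication", "log-in"]),
   ("authenticate", PySem.Set.ofList ["login", "signin", "sign-in", "authenticate", "authentication", "log-in"]),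
   ("authentication", PySem.Set.ofList ["login", "signin", "sign-in", "authenticate", "authentication", "log-in"]),
   ("log-in", PySem.Set.ofList ["login", "signin", "sign-in", "authenticate", "authentication", "log-in"]),
   ("logout", PySem.Set.ofList ["logout", "signout", "sign-out", "log-out"]),
   ("signout", PySem.Set.ofList ["logout", "signout", "sign-out", "log-out"]),
   ("sign-out", PySem.Set.ofList ["logout", "signout", "sign-out", "log-out"]),
   ("log-out", PySem.Set.ofList ["logout", "signout", "sign-out", "log-out"]),
   ("create", PySem.Set.ofList ["create", "add", "make", "build", "implement", "develop"]),
   ("add", PySem.Set.ofList ["create", "add", "make", "build", "implement", "develop"]),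
   ("make", PySem.Set.ofList ["create", "add", "make", "build", "implement", "develop"]),
   ("build", PySem.Set.ofList ["create", "add", "make", "build", "implement", "develop"]),
   ("implement", PySem.Set.ofList ["create", "add", "make", "build", "implement", "develop"]),
   ("develop", PySem.Set.ofList ["create", "add", "make", "build", "implement", "develop"]),
   ("update", PySem.Set.ofList ["update", "edit", "modify", "change", "revise"]),
   ("edit", PySem.Set.ofList ["update", "edit", "modify", "change", "revise"]),
   ("modify", PySem.Set.ofList ["update", "edit", "modify", "change", "revise"]),
   ("change", PySem.Set.ofList ["update", "edit", "modify", "change", "revise"]),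
   ("revise", PySem.Set.ofList ["update", "edit", "modify", "change", "revise"]),
   ("delete", PySem.Set.ofList ["delete", "remove", "erase", "drop"]),
   ("remove", PySem.Set.ofList ["delete", "remove", "erase", "drop"]),
   ("erase", PySem.Set.ofList ["delete", "remove", "erase", "drop"]),
   ("drop", PySem.Set.ofList ["delete", "remove", "erase", "drop"]),
   ("view", PySem.Set.ofList ["view", "display", "show", "see", "list"]),
   ("display", PySem.Set.ofList ["view", "display", "show", "see", "list"]),
   ("show", PySem.Set.ofList ["view", "display", "show", "see", "list"]),
   ("see", PySem.Set.ofList ["view", "display", "show", "see", "list"]),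
   ("list", PySem.Set.ofList ["view", "display", "show", "see", "list"]),
   ("user", PySem.Set.ofList ["user", "users", "customer", "customers", "member", "members"]),
   ("users", PySem.Set.ofList ["user", "users", "customer", "customers", "member", "members"]),
   ("customer", PySem.Set.ofList ["user", "users", "customer", "customers", "member", "members"]),
   ("customers", PySem.Set.ofList ["user", "users", "customer", "customers", "member", "members"]),
   ("member", PySem.Set.ofList ["user", "users", "customer", "customers", "member", "members"]),
   ("members", PySem.Set.ofList ["user", "users", "customer", "customers", "member", "members"]),
   ("password", PySem.Set.ofList ["password", "passwords", "credential", "credentials", "pass"]),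
   ("passwords", PySem.Set.ofList ["password", "passwords", "credential", "credentials", "pass"]),
   ("credential", PySem.Set.ofList ["password", "passwords", "credential", "credentials", "pass"]),
   ("credentials", PySem.Set.ofList ["password", "passwords", "credential", "credentials", "pass"]),
   ("pass", PySem.Set.ofList ["password", "passwords", "credential", "credentials", "pass"]),
   ("email", PySem.Set.ofList ["email", "emails", "e-mail", "mail"]),
   ("emails", PySem.Set.ofList ["email", "emails", "e-mail", "mail"]),
   ("e-mail", PySem.Set.ofList ["email", "emails", "e-mail", "mail"]),
   ("mail", PySem.Set.ofList ["email", "emails", "e-mail", "mail"]),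
   ("profile", PySem.Set.ofList ["profile", "profiles", "account", "accounts"]),
   ("profiles", PySem.Set.ofList ["profile", "profiles", "account", "accounts"]),
   ("account", PySem.Set.ofList ["profile", "profiles", "account", "accounts"]),
   ("accounts", PySem.Set.ofList ["profile", "profiles", "account", "accounts"]),
   ("reset", PySem.Set.ofList ["reset", "restore", "recover", "recovery"]),
   ("restore", PySem.Set.ofList ["reset", "restore", "recover", "recovery"]),
   ("recover", PySem.Set.ofList ["reset", "restore", "recover", "recovery"]),
   ("recovery", PySem.Set.ofList ["reset", "restore", "recover", "recovery"]),
   ("notification", PySem.Set.ofList ["notification", "notifications", "notify", "alert", "alerts"]),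
   ("notifications", PySem.Set.ofList ["notification", "notifications", "notify", "alert", "alerts"]),
   ("notify", PySem.Set.ofList ["notification", "notifications", "notify", "alert", "alerts"]),
   ("alert", PySem.Set.ofList ["notification", "notifications", "notify", "alert", "alerts"]),
   ("alerts", PySem.Set.ofList ["notification", "notifications", "notify", "alert", "alerts"]),
   ("automatic", PySem.Set.ofList ["automatic", "auto", "automatically"]),
   ("auto", PySem.Set.ofList ["automatic", "auto", "automatically"]),
   ("automatically", PySem.Set.ofList ["automatic", "auto", "automatically"]),
   ("enable", PySem.Set.ofList ["enable", "enabled", "activate", "turn-on"]),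
   ("enabled", PySem.Set.ofList ["enable", "enabled", "activate", "turn-on"]),
   ("activate", PySem.Set.ofList ["enable", "enabled", "activate", "turn-on"]),
   ("turn-on", PySem.Set.ofList ["enable", "enabled", "activate", "turn-on"]),
   ("disable", PySem.Set.ofList ["disable", "disabled", "deactivate", "turn-off"]),
   ("disabled", PySem.Set.ofList ["disable", "disabled", "deactivate", "turn-off"]),
   ("deactivate", PySem.Set.ofList ["disable", "disabled", "deactivate", "turn-off"]),
   ("turn-off", PySem.Set.ofList ["disable", "disabled", "deactivate", "turn-off"]),
   ("export", PySem.Set.ofList ["export", "download", "extract"]),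
   ("download", PySem.Set.ofList ["export", "download", "extract"]),
   ("extract", PySem.Set.ofList ["export", "download", "extract"]),
   ("import", PySem.Set.ofList ["import", "upload", "load"]),
   ("upload", PySem.Set.ofList ["import", "upload", "load"]),
   ("load", PySem.Set.ofList ["import", "upload", "load"]),
   ("data", PySem.Set.ofList ["data", "information", "info"]),
   ("information", PySem.Set.ofList ["data", "information", "info"]),
   ("info", PySem.Set.ofList ["data", "information", "info"]),
   ("dashboard", PySem.Set.ofList ["dashboard", "panel", "overview"]),
   ("panel", PySem.Set.ofList ["dashboard", "panel", "overview"]),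
   ("overview", PySem.Set.ofList ["dashboard", "panel", "overview"])]

def get_synonyms_py_alt (word : String) : List String :=
  PySem.Set.union (PySem.Set.ofList [word]) (pvSynMap.getD word PySem.Set.empty)

-- ===== PRECONDITION & SPEC =====
def Spec_get_synonyms_py (word : String) (out : List String) : Prop := out = get_synonyms_py_alt word
instance (word : String) (out : List String) : Decidable (Spec_get_synonyms_py word out) := by unfold Spec_get_synonyms_py; infer_instance

-- ===== CLAIM (what is proved, stated in full; the proofs are below) =====
def Claim_equal_get_synonyms_py : Prop := ∀ (word : String), Dom_get_synonyms_py word → Spec_get_synonyms_py word (get_synonyms_py word)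

-- ===== LEMMAS AND PROOFS =====

-- all words occurring in any synonym group
def pvAllWords : List String :=
  ["login", "signin", "sign-in", "authenticate", "authentication", "log-in", "logout", "signout", "sign-out", "log-out", "create", "add", "make", "build", "implement", "develop", "update", "edit", "modify", "change", "revise", "delete", "remove", "erase", "drop", "view", "display", "show", "see", "list", "user", "users", "customer", "customers", "member", "members", "password", "passwords", "credential", "credentials", "pass", "email", "emails", "e-mail", "mail", "profile", "profiles", "account", "accounts", "reset", "restore", "recover", "recovery", "notification", "notifications", "notify", "alert", "alerts", "automatic", "auto", "automatically", "enable", "enabled", "activate", "turn-on", "disable", "disabled", "deactivate", "turn-off", "export", "download", "extract", "import", "upload", "load", "data", "information", "info", "dashboard", "panel", "overview"]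

set_option maxRecDepth 8192 in
set_option maxHeartbeats 2000000 in
theorem pv_known (word : String) (h : word ∈ pvAllWords) :
    get_synonyms_py word = get_synonyms_py_alt word := by
  simp only [pvAllWords, List.mem_cons, List.not_mem_nil, or_false] at h
  rcases h with rfl|rfl|rfl|rfl|rfl|rfl|rfl|rfl|rfl|rfl|rfl|rfl|rfl|rfl|rfl|rfl|rfl|rfl|rfl|rfl|rfl|rfl|rfl|rfl|rfl|rfl|rfl|rfl|rfl|rfl|rfl|rfl|rfl|rfl|rfl|rfl|rfl|rfl|rfl|rfl|rfl|rfl|rfl|rfl|rfl|rfl|rfl|rfl|rfl|rfl|rfl|rfl|rfl|rfl|rfl|rfl|rfl|rfl|rfl|rfl|rfl|rfl|rfl|rfl|rfl|rfl|rfl|rfl|rfl|rfl|rfl|rfl|rfl|rfl|rfl|rfl|rfl|rfl|rfl|rfl|rfl <;> decide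

theorem pv_unknown (word : String) (h : word ∉ pvAllWords) :
    get_synonyms_py word = get_synonyms_py_alt word := by
  simp only [pvAllWords, List.mem_cons, List.not_mem_nil, or_false, not_or] at h
  obtain ⟨h0, h1, h2, h3, h4, h5, h6, h7, h8, h9, h10, h11, h12, h13, h14, h15, h16, h17, h18, h19, h20, h21, h22, h23, h24, h25, h26, h27, h28, h29, h30, h31, h32, h33, h34, h35, h36, h37, h38, h39, h40, h41, h42, h43, h44, h45, h46, h47, h48, h49, h50, h51, h52, h53, h54, h55, h56, h57, h58, h59, h60, h61, h62, h63, h64, h65, h66, h67, h68, h69, h70, h71, h72, h73, h74, h75, h76, h77, h78, h79, h80⟩ := h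
  simp [get_synonyms_py, get_synonyms_py_alt, pvSynGroups, pvSynMap,
    PySem.Set.contains, PySem.Set.union, PySem.Set.update, PySem.Set.add, PySem.Set.ofList,
    PySem.Dict.getD, PySem.Dict.get?,
    h0, h1, h2, h3, h4, h5, h6, h7, h8, h9, h10, h11, h12, h13, h14, h15, h16, h17, h18, h19, h20, h21, h22, h23, h24, h25, h26, h27, h28, h29, h30, h31, h32, h33, h34, h35, h36, h37, h38, h39, h40, h41, h42, h43, h44, h45, h46, h47, h48, h49, h50, h51, h52, h53, h54, h55, h56, h57, h58, h59, h60, h61, h62, h63, h64, h65, h66, h67, h68, h69, h70, h71, h72, h73, h74, h75, h76, h77, h78, h79, h80, Ne.symm h0, Ne.symm h1, Ne.symm h2, Ne.symm h3, Ne.symm h4, Ne.symm h5, Ne.symm h6, Ne.symm h7, Ne.symm h8, Ne.symm h9, Ne.symm h10, Ne.symm h11, Ne.symm h12, Ne.symm h13, Ne.symm h14, Ne.symm h15, Ne.symm h16, Ne.symm h17, Ne.symm h18, Ne.symm h19, Ne.symm h20, Ne.symm h21, Ne.symm h22, Ne.symm h23, Ne.symm h24, Ne.symm h25, Ne.symm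 h26, Ne.symm h27, Ne.symm h28, Ne.symm h29, Ne.symm h30, Ne.symm h31, Ne.symm h32, Ne.symm h33, Ne.symm h34, Ne.symm h35, Ne.symm h36, Ne.symm h37, Ne.symm h38, Ne.symm h39, Ne.symm h40, Ne.symm h41, Ne.symm h42, Ne.symm h43, Ne.symm h44, Ne.symm h45, Ne.symm h46, Ne.symm h47, Ne.symm h48, Ne.symm h49, Ne.symm h50, Ne.symm h51, Ne.symm h52, Ne.symm h53, Ne.symm h54, Ne.symm h55, Ne.symm h56, Ne.symm h57, Ne.symm h58, Ne.symm h59, Ne.symm h60, Ne.symm h61, Ne.symm h62, Ne.symm h63, Ne.symm h64, Ne.symm h65, Ne.symm h66, Ne.symm h67, Ne.symm h68, Ne.symm h69, Ne.symm h70, Ne.symm h71, Ne.symm h72, Ne.symm h73, Ne.symm h74, Ne.symm h75, Ne.symm h76, Ne.symm h77, Ne.symm h78, Ne.symm h79, Ne.symm h80]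

-- ===== VERDICT (by name: the statement is the Claim_ definition above) =====
theorem get_synonyms_py_spec : Claim_equal_get_synonyms_py := by
  intro word _
  unfold Spec_get_synonyms_py
  by_cases h : word ∈ pvAllWords
  · exact pv_known word h
  · exact pv_unknown word h
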